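-- pv_equiv track=rewrite | github.com/Nishant-l/MaximlLabs-ans | ans.py | smallSubDistinct
-- ===== SOURCE A (Python) =====
-- Nc = 256
--
-- def maxDistChar(str, n):
--
-- 	count = [0] * Nc
-- 	for i in range(n):
-- 		count[ord(str[i])] += 1
--
-- 	max_distinct = 0
-- 	for i in range(Nc):
-- 		if (count[i] != 0):
-- 			max_distinct += 1
-- 	return max_distinct
--
-- def smallSubDistinct(str):
--
-- 	n = len(str)
-- 	max_distinct =maxDistChar(str, n)
-- 	minl = n
--
-- 	for i in range(n):
-- 		for j in range(n):
-- 			subs = str[i:j]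
-- 			subs_lenght = len(subs)
-- 			sub_distinct_char = maxDistChar(subs, subs_lenght)
--
-- 			if (subs_lenght < minl and
-- 				max_distinct == sub_distinct_char):
-- 				minl = subs_lenght
-- 	return minl
-- ===== SOURCE B (Python) =====
-- def smallSubDistinct(str):
--     n = len(str)
--     need = len(set(str))
--     best = n
--     for i in range(n):
--         seen = set()
--         for j in range(i, n):
--             seen.add(str[j])
--             if len(seen) == need:
--                 if j + 1 - i < best:
--                     best = j + 1 - i
--                 break
--     return best
-- ===== Notes on version B (the rewrite author's own statement) =====
-- stated objective: faster
-- what changed: B replaces A's triple loop that rebuilds a 256-slot count array for every (i,j) substring pair by a per-start incremental character-set scan that stops at the first window covering all distinct characters, against a precomputed distinct count.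
-- intended difference: On strings where every shortest all-distinct-covering substring ends at the last character (A's str[i:j] with j < n never includes it), A returns the longer best among substrings excluding the last character (or n), while B returns the true shortest covering-substring length, which is the intended value. — e.g. on smallSubDistinct("aab"): A returns 3, B returns 2
import Mathlib
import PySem

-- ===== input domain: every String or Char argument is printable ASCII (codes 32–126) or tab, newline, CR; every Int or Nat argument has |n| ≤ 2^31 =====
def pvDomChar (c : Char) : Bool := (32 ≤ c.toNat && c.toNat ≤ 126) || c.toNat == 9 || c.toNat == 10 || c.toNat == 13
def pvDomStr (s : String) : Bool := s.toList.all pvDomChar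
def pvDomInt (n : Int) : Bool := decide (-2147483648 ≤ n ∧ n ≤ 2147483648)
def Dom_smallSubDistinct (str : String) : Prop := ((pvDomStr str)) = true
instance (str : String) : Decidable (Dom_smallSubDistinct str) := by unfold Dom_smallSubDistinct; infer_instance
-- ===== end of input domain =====

-- B replaces A's cubic recount-every-substring scan by a per-start incremental
-- character-set scan with early exit; where A's window loop accidentally excludes
-- the last character, B returns the true shortest covering length (see D_ below).

-- ===== PORT A =====
def maxDistChar (s : List Char) (n : Int) : Int :=
  let count : List Int := List.replicate 256 0
  let count := (PySem.List.pyRange 0 n 1).foldl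
    (fun count i =>
      PySem.List.pySetD count ((PySem.List.pyGetD s i ' ').toNat : Int)
        (PySem.List.pyGetD count ((PySem.List.pyGetD s i ' ').toNat : Int) 0 + 1)) count
  (PySem.List.pyRange 0 256 1).foldl
    (fun md i => if PySem.List.pyGetD count i 0 ≠ 0 then md + 1 else md) 0

def smallSubDistinct (str : String) : Int :=
  let s := str.toList
  let n : Int := s.length
  let max_distinct := maxDistChar s n
  (PySem.List.pyRange 0 n 1).foldl
    (fun minl i =>
      (PySem.List.pyRange 0 n 1).foldl
        (fun minl j =>
          let subs := PySem.List.slice s (some i) (some j)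
          let subs_lenght : Int := subs.length
          let sub_distinct_char := maxDistChar subs subs_lenght
          if subs_lenght < minl ∧ max_distinct = sub_distinct_char then subs_lenght else minl)
        minl)
    n

-- ===== PORT B =====
-- the inner 'for j in range(i, n): … break' loop of Source B (break = early return)
def sdInner (s : List Char) (need : Int) (i : Int) (seen : PySem.Set Char)
    (js : List Int) (best : Int) : Int :=
  match js with
  | [] => best
  | j :: rest =>
      let seen' := PySem.Set.add seen (PySem.List.pyGetD s j ' ')
      if PySem.Set.len seen' = need then
        (if j + 1 - i < best then j + 1 - i else best)
      else sdInner s need i seen' rest best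

def smallSubDistinct_alt (str : String) : Int :=
  let s := str.toList
  let n : Int := s.length
  let need : Int := PySem.Set.len (PySem.Set.ofList s)
  (PySem.List.pyRange 0 n 1).foldl
    (fun best i => sdInner s need i PySem.Set.empty (PySem.List.pyRange i n 1) best) n

-- ===== PRECONDITION & SPEC =====

-- 'suffStart s' is the largest start b whose suffix s[b:] still has every distinct character of s
def suffStart (s : List Char) : Nat :=
  Nat.findGreatest (fun i => (s.drop i).toFinset = s.toFinset) s.length

-- On strings where every shortest all-distinct-covering substring ends at the last
-- character (A's str[i:j] with j < n never includes it), A returns the longer best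
-- among substrings excluding the last character (or n), while B returns the true
-- shortest covering-substring length, which is the intended value.
def D_smallSubDistinct (str : String) : Prop :=
  1 ≤ suffStart str.toList ∧
    ∀ i < suffStart str.toList,
      ((str.toList.drop i).take (str.toList.length - suffStart str.toList)).toFinset
        ≠ str.toList.toFinset
instance (str : String) : Decidable (D_smallSubDistinct str) := by
  unfold D_smallSubDistinct; infer_instance

def Spec_smallSubDistinct (str : String) (out : Int) : Prop :=
  ¬ D_smallSubDistinct str → out = smallSubDistinct_alt str
instance (str : String) (out : Int) : Decidable (Spec_smallSubDistinct str out) := by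
  unfold Spec_smallSubDistinct; infer_instance

def pvDiffWitness_smallSubDistinct : String := "aab"
def pvDiffWitnessOut_smallSubDistinct : Int × Int := (3, 2)

-- ===== CLAIM (what is proved, stated in full; the proofs are below) =====
def Claim_unchanged_smallSubDistinct : Prop := ∀ (str : String), Dom_smallSubDistinct str → Spec_smallSubDistinct str (smallSubDistinct str)
def Claim_changed_smallSubDistinct : Prop := Dom_smallSubDistinct (pvDiffWitness_smallSubDistinct) ∧ D_smallSubDistinct (pvDiffWitness_smallSubDistinct) ∧ smallSubDistinct (pvDiffWitness_smallSubDistinct) = pvDiffWitnessOut_smallSubDistinct.1 ∧ smallSubDistinct_alt (pvDiffWitness_smallSubDistinct) = pvDiffWitnessOut_smallSubDistinct.2 ∧ pvDiffWitnessOut_smallSubDistinct.1 ≠ pvDiffWitnessOut_smallSubDistinct.2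
def Claim_exact_smallSubDistinct : Prop := ∀ (str : String), Dom_smallSubDistinct str → D_smallSubDistinct str → smallSubDistinct str ≠ smallSubDistinct_alt str

-- ===== LEMMAS AND PROOFS =====

-- number of distinct characters of a list (proof-side)
def distC (l : List Char) : Nat := l.toFinset.card

-- 'the window of length l starting at i contains every distinct character of s' (proof-side)
def covWin (s : List Char) (i l : Nat) : Prop :=
  i + l ≤ s.length ∧ distC ((s.drop i).take l) = distC s

-- for a sub-collection of s, set equality and count equality coincide
theorem window_eq_iff (s t : List Char) (hsub : t ⊆ s) :
    t.toFinset = s.toFinset ↔ distC t = distC s := by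
  constructor
  · intro h; unfold distC; rw [h]
  · intro h
    apply Finset.eq_of_subset_of_card_le
    · intro x hx; exact List.mem_toFinset.mpr (hsub (List.mem_toFinset.mp hx))
    · unfold distC at h; omega

theorem char_toNat_injective : Function.Injective Char.toNat := by
  intro a b h
  exact Char.ext (by exact UInt32.toNat_inj.mp h)

theorem setLen_ofList (l : List Char) :
    PySem.Set.len (PySem.Set.ofList l) = (distC l : Int) := by
  have hnd : (PySem.Set.ofList l).Nodup := PySem.Set.nodup_ofList l
  have hmem : ∀ x, x ∈ PySem.Set.ofList l ↔ x ∈ l := fun x => PySem.Set.mem_ofList l x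
  have h1 : (PySem.Set.ofList l).toFinset = l.toFinset := by
    ext x; simp [hmem x]
  have h2 : (PySem.Set.ofList l).length = (PySem.Set.ofList l).toFinset.card :=
    (List.toFinset_card_of_nodup hnd).symm
  simp [PySem.Set.len, distC, h2, h1]

theorem count_foldl (l : List Char) (cnt : List Int) (h : cnt.length = 256)
    (hl : ∀ c ∈ l, c.toNat < 256) (k : Nat) (hk : k < 256) :
    (l.foldl (fun cc c => cc.set c.toNat (cc.getD c.toNat 0 + 1)) cnt).getD k 0
      = cnt.getD k 0 + (l.countP (fun c => c.toNat = k) : Int) := by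
  induction l generalizing cnt with
  | nil => simp
  | cons c tl ih =>
      have hc : c.toNat < 256 := hl c (by simp)
      have hlen : (cnt.set c.toNat (cnt.getD c.toNat 0 + 1)).length = 256 := by
        simp [h]
      rw [List.foldl_cons, ih _ hlen (fun x hx => hl x (by simp [hx]))]
      by_cases hck : c.toNat = k
      · subst hck
        have : (cnt.set c.toNat (cnt.getD c.toNat 0 + 1)).getD c.toNat 0
            = cnt.getD c.toNat 0 + 1 := by
          simp [List.getD, h, hc]
        rw [this]
        simp
        ring
      · have : (cnt.set c.toNat (cnt.getD c.toNat 0 + 1)).getD k 0 = cnt.getD k 0 := by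
          simp [List.getD, List.getElem?_set_ne hck]
        rw [this]
        simp [hck]

theorem maxDistChar_eq (l : List Char) (hl : ∀ c ∈ l, c.toNat < 256) :
    maxDistChar l (l.length : Int) = (distC l : Int) := by
  unfold maxDistChar
  simp only []
  rw [PySem.List.foldl_pyRange_zero_pyGetD' l ' '
        (fun cc ch => PySem.List.pySetD cc ((ch.toNat : Int))
          (PySem.List.pyGetD cc ((ch.toNat : Int)) 0 + 1)) (List.replicate 256 0)]
  simp only [PySem.List.pySetD_natCast, PySem.List.pyGetD_natCast]
  rw [PySem.List.foldl_ite_add_one]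
  rw [show (256:Int) = ((256:Nat):Int) by norm_num, PySem.List.pyRange_zero_nat 256]
  rw [List.countP_map]
  have h0 : ∀ k : Nat, k < 256 → (List.replicate 256 (0:Int)).getD k 0 = 0 := by
    intro k hk
    rw [List.getD_eq_getElem?_getD, List.getElem?_replicate]
    simp [hk]
  have hq : ∀ x ∈ List.range 256,
      ((fun i => decide (PySem.List.pyGetD
          (List.foldl (fun cc c => cc.set c.toNat (cc.getD c.toNat 0 + 1)) (List.replicate 256 (0:Int)) l) i 0 ≠ 0)) ∘ fun k : Nat => (k : Int)) x = true
        ↔ (decide (0 < l.countP (fun c => c.toNat = x))) = true := by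
    intro k hk
    have hk' := List.mem_range.mp hk
    simp only [Function.comp_apply, PySem.List.pyGetD_natCast, decide_eq_true_eq]
    rw [count_foldl l (List.replicate 256 (0:Int)) (by rw [List.length_replicate]) hl k hk', h0 k hk', zero_add]
    constructor
    · intro h
      rcases Nat.eq_zero_or_pos (List.countP (fun c => decide (c.toNat = k)) l) with h2|h2
      · exact absurd (by exact_mod_cast h2) h
      · exact h2
    · intro h h2
      omega
  rw [List.countP_congr hq]
  have hnd : ((List.range 256).filter (fun k => decide (0 < l.countP (fun c => c.toNat = k)))).Nodup :=
    (List.nodup_range).filter _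
  have hfin : ((List.range 256).filter (fun k => decide (0 < l.countP (fun c => c.toNat = k)))).toFinset
      = l.toFinset.image Char.toNat := by
    ext k
    simp only [List.mem_toFinset, List.mem_filter, List.mem_range, Finset.mem_image,
      decide_eq_true_eq, List.countP_pos_iff]
    constructor
    · rintro ⟨-, c, hc, hck⟩
      exact ⟨c, hc, by simpa using hck⟩
    · rintro ⟨c, hc, hck⟩
      exact ⟨hck ▸ hl c hc, c, hc, by simpa using hck⟩
  have hlen : ((List.range 256).filter (fun k => decide (0 < l.countP (fun c => c.toNat = k)))).length
      = (l.toFinset.image Char.toNat).card := by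
    rw [← hfin, List.toFinset_card_of_nodup hnd]
  rw [List.countP_eq_length_filter]
  rw [hlen, Finset.card_image_of_injective _ char_toNat_injective]
  simp [distC]

theorem find?_congr {α : Type} (p q : α → Bool) :
    ∀ (l : List α), (∀ x ∈ l, p x = q x) → l.find? p = l.find? q := by
  intro l
  induction l with
  | nil => intro _; rfl
  | cons x tl ih =>
      intro h
      rw [List.find?_cons, List.find?_cons, h x (by simp)]
      cases q x
      · exact ih (fun y hy => h y (by simp [hy]))
      · rfl

theorem foldl_keep (v : Int → Int) (p : Int → Prop) [DecidablePred p] :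
    ∀ (l : List Int) (m : Int), (∀ j ∈ l, ¬(v j < m ∧ p j)) →
      l.foldl (fun m j => if v j < m ∧ p j then v j else m) m = m := by
  intro l
  induction l with
  | nil => intro m _; rfl
  | cons x tl ih =>
      intro m h
      rw [List.foldl_cons, if_neg (h x (by simp))]
      exact ih m (fun j hj => h j (by simp [hj]))

theorem firstHit (p : Int → Prop) [DecidablePred p] (i b : Int) :
    ∀ (k : Nat) (a m : Int), (b - a).toNat = k → i < a →
      (∀ j j', a ≤ j → j ≤ j' → j' < b → p j → p j') →
      (PySem.List.pyRange a b 1).foldl (fun m j => if j - i < m ∧ p j then j - i else m) m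
        = (match (PySem.List.pyRange a b 1).find? (fun j => decide (p j)) with
           | none => m
           | some j0 => if j0 - i < m then j0 - i else m) := by
  intro k
  induction k with
  | zero =>
      intro a m hk _ _
      rw [PySem.List.pyRange_one_eq_nil (by omega)]
      rfl
  | succ k ih =>
      intro a m hk hia hup
      have hab : a < b := by omega
      rw [PySem.List.pyRange_one_cons hab, List.foldl_cons, List.find?_cons]
      by_cases hpa : p a
      · rw [decide_eq_true hpa]
        have hstep : (if a - i < m ∧ p a then a - i else m) = (if a - i < m then a - i else m) := by
          split_ifs with h1 h2 h3 <;> first | rfl | (exfalso; tauto)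
        rw [hstep]
        have hub : (if a - i < m then a - i else m) ≤ a - i := by split_ifs <;> omega
        exact foldl_keep (fun j => j - i) p _ _ (fun j hj hc => by
          have hj' := (PySem.List.mem_pyRange_one.mp hj).1
          have hc1 : j - i < (if a - i < m then a - i else m) := hc.1
          split_ifs at hc1 <;> omega)
      · rw [if_neg (by tauto), decide_eq_false hpa]
        exact ih (a + 1) m (by omega) (by omega)
          (fun j j' h1 h2 h3 => hup j j' (by omega) h2 h3)

theorem distC_le_of_subset {l l' : List Char} (h : l ⊆ l') : distC l ≤ distC l' :=
  Finset.card_le_card (fun _ hx => List.mem_toFinset.mpr (h (List.mem_toFinset.mp hx)))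

theorem distC_slice_le (s : List Char) (a b : Option Int) :
    distC (PySem.List.slice s a b) ≤ distC s :=
  distC_le_of_subset (fun _ hx => PySem.List.mem_of_mem_slice s a b hx)

theorem distC_pos (s : List Char) (h : s ≠ []) : 0 < distC s := by
  cases s with
  | nil => exact absurd rfl h
  | cons x tl => exact Finset.card_pos.mpr ⟨x, List.mem_toFinset.mpr (by simp)⟩

theorem slice_len_int (s : List Char) (i j : Int) (h0 : 0 ≤ i) (hij : i ≤ j)
    (hj : j ≤ (s.length : Int)) :
    ((PySem.List.slice s (some i) (some j)).length : Int) = j - i := by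
  rw [PySem.List.slice_toNat _ h0 (by omega)]
  simp only [List.length_take, List.length_drop]
  omega

theorem slice_nil_of_le (s : List Char) (i j : Int) (h0 : 0 ≤ i) (h0j : 0 ≤ j)
    (hji : j ≤ i) : PySem.List.slice s (some i) (some j) = [] := by
  rw [PySem.List.slice_toNat _ h0 h0j]
  have h : j.toNat - i.toNat = 0 := by omega
  rw [h, List.take_zero]

theorem distC_slice_mono (s : List Char) (i j j' : Int) (h0 : 0 ≤ i) (hj : 0 ≤ j)
    (hjj : j ≤ j') :
    distC (PySem.List.slice s (some i) (some j)) ≤ distC (PySem.List.slice s (some i) (some j')) := by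
  rw [PySem.List.slice_toNat _ h0 hj, PySem.List.slice_toNat _ h0 (by omega)]
  refine distC_le_of_subset ?_
  intro x hx
  have hmin : j.toNat - i.toNat = min (j.toNat - i.toNat) (j'.toNat - i.toNat) := by omega
  rw [hmin, ← List.take_take] at hx
  exact List.take_subset _ _ hx

theorem ofList_snoc (l : List Char) (x : Char) :
    PySem.Set.ofList (l ++ [x]) = PySem.Set.add (PySem.Set.ofList l) x := by
  rw [PySem.Set.ofList_eq_foldl, PySem.Set.ofList_eq_foldl, List.foldl_append]
  rfl

theorem slice_snoc (s : List Char) (i a : Int) (h0 : 0 ≤ i) (hia : i ≤ a)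
    (han : a < (s.length : Int)) :
    PySem.List.slice s (some i) (some (a+1))
      = PySem.List.slice s (some i) (some a) ++ [PySem.List.pyGetD s a ' '] := by
  rw [PySem.List.slice_toNat _ h0 (by omega), PySem.List.slice_toNat _ h0 (by omega)]
  have h1 : (a+1).toNat - i.toNat = (a.toNat - i.toNat) + 1 := by omega
  rw [h1, List.take_add_one]
  congr 1
  rw [List.getElem?_drop]
  have h2 : i.toNat + (a.toNat - i.toNat) = a.toNat := by omega
  rw [h2, List.getElem?_eq_getElem (by omega)]
  rw [PySem.List.pyGetD_eq_getElem s ' ' (by omega) (by omega)]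
  rfl

-- B's inner loop is 'first j in [a,bnd) whose window covers everything'
theorem sdInner_eq (s : List Char) (i : Int) (hi : 0 ≤ i) (bnd : Int)
    (hbnd : bnd ≤ (s.length : Int)) :
    ∀ (k : Nat) (a m : Int), (bnd - a).toNat = k → i ≤ a →
      sdInner s (distC s : Int) i
          (PySem.Set.ofList (PySem.List.slice s (some i) (some a)))
          (PySem.List.pyRange a bnd 1) m
        = (match (PySem.List.pyRange a bnd 1).find?
              (fun j => decide (distC (PySem.List.slice s (some i) (some (j+1))) = distC s)) with
           | none => m
           | some j0 => if j0 + 1 - i < m then j0 + 1 - i else m) := by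
  intro k
  induction k with
  | zero =>
      intro a m hk _
      rw [PySem.List.pyRange_one_eq_nil (by omega)]
      rfl
  | succ k ih =>
      intro a m hk hia
      rw [PySem.List.pyRange_one_cons (by omega), List.find?_cons]
      simp only [sdInner]
      have hseen : PySem.Set.add (PySem.Set.ofList (PySem.List.slice s (some i) (some a)))
          (PySem.List.pyGetD s a ' ')
          = PySem.Set.ofList (PySem.List.slice s (some i) (some (a+1))) := by
        rw [slice_snoc s i a hi hia (by omega), ofList_snoc]
      rw [hseen, setLen_ofList]
      by_cases hd : distC (PySem.List.slice s (some i) (some (a+1))) = distC s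
      · rw [if_pos (by exact_mod_cast hd), decide_eq_true hd]
      · rw [if_neg (by exact_mod_cast hd), decide_eq_false hd]
        exact ih (a+1) m (by omega) (by omega)

theorem pyRange_shift (a b : Int) :
    PySem.List.pyRange (a+1) b 1 = (PySem.List.pyRange a (b-1) 1).map (· + 1) := by
  rw [PySem.List.pyRange_one, PySem.List.pyRange_one]
  have h : b - (a+1) = (b-1) - a := by ring
  rw [h, List.map_map]
  apply List.map_congr_left
  intro k _
  simp only [Function.comp_apply]
  ring

theorem AinnerStd_eq (s : List Char) (hne : s ≠ []) (i : Int) (hi : 0 ≤ i)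
    (hin : i < (s.length : Int)) (m : Int) :
    (PySem.List.pyRange 0 (s.length : Int) 1).foldl
      (fun minl j =>
        if ((PySem.List.slice s (some i) (some j)).length : Int) < minl ∧
            (distC s : Int) = (distC (PySem.List.slice s (some i) (some j)) : Int)
        then ((PySem.List.slice s (some i) (some j)).length : Int) else minl) m
    = (match (PySem.List.pyRange i ((s.length : Int) - 1) 1).find?
          (fun j => decide (distC (PySem.List.slice s (some i) (some (j+1))) = distC s)) with
       | none => m
       | some j0 => if j0 + 1 - i < m then j0 + 1 - i else m) := by
  have hD := distC_pos s hne
  rw [PySem.List.pyRange_one_append 0 (i+1) (s.length : Int) (by omega) (by omega),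
    List.foldl_append]
  rw [foldl_keep (fun j => ((PySem.List.slice s (some i) (some j)).length : Int))
      (fun j => (distC s : Int) = (distC (PySem.List.slice s (some i) (some j)) : Int))
      _ m (fun j hj hc => by
        have hj' := PySem.List.mem_pyRange_one.mp hj
        simp only [] at hc
        rw [slice_nil_of_le s i j hi (by omega) (by omega)] at hc
        have h2 := hc.2
        rw [show distC ([] : List Char) = 0 from by simp [distC]] at h2
        omega)]
  have hseg := PySem.List.foldl_congr_mem
    (l := PySem.List.pyRange (i+1) ((s.length : Int)) 1) (init := m)
    (f := fun minl j =>
      if ((PySem.List.slice s (some i) (some j)).length : Int) < minl ∧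
          (distC s : Int) = (distC (PySem.List.slice s (some i) (some j)) : Int)
      then ((PySem.List.slice s (some i) (some j)).length : Int) else minl)
    (g := fun mm j =>
      if j - i < mm ∧ (distC s : Int) = (distC (PySem.List.slice s (some i) (some j)) : Int)
      then j - i else mm)
    (fun acc j hj => by
      have hj' := PySem.List.mem_pyRange_one.mp hj
      simp only []
      rw [slice_len_int s i j hi (by omega) (by omega)])
  rw [hseg]
  rw [firstHit (fun j => (distC s : Int) = (distC (PySem.List.slice s (some i) (some j)) : Int))
      i (s.length : Int) ((s.length : Int) - (i+1)).toNat (i+1) m rfl (by omega)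
      (fun j j' h1 h2 h3 hp => by
        have hmono := distC_slice_mono s i j j' hi (by omega) h2
        have hle := distC_slice_le s (some i) (some j')
        have : distC (PySem.List.slice s (some i) (some j)) = distC s := by exact_mod_cast hp.symm
        omega)]
  rw [pyRange_shift i (s.length : Int), List.find?_map]
  rw [find?_congr _ (fun j => decide (distC (PySem.List.slice s (some i) (some (j+1))) = distC s)) _
      (fun x _ => by
        simp only [Function.comp_apply]
        exact decide_eq_decide.mpr
          ⟨fun h => by exact_mod_cast h.symm, fun h => by exact_mod_cast h.symm⟩)]
  cases hf : List.find?
      (fun j => decide (distC (PySem.List.slice s (some i) (some (j+1))) = distC s))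
      (PySem.List.pyRange i ((s.length : Int) - 1) 1) with
  | none => rfl
  | some j0 => rfl

-- the common outer-loop step: first covering window starting at i with end < bnd
def stepW (s : List Char) (bnd : Int) (m i : Int) : Int :=
  match (PySem.List.pyRange i bnd 1).find?
      (fun j => decide (distC (PySem.List.slice s (some i) (some (j+1))) = distC s)) with
  | none => m
  | some j0 => if j0 + 1 - i < m then j0 + 1 - i else m

theorem stepW_le (s : List Char) (bnd m i : Int) : stepW s bnd m i ≤ m := by
  unfold stepW
  cases hf : (PySem.List.pyRange i bnd 1).find?
      (fun j => decide (distC (PySem.List.slice s (some i) (some (j+1))) = distC s)) with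
  | none => simp
  | some j0 => simp only []; split_ifs <;> omega

theorem foldW_le_init (s : List Char) (bnd : Int) :
    ∀ (l : List Int) (m : Int), l.foldl (stepW s bnd) m ≤ m := by
  intro l
  induction l with
  | nil => intro m; simp
  | cons x tl ih =>
      intro m
      rw [List.foldl_cons]
      exact le_trans (ih (stepW s bnd m x)) (stepW_le s bnd m x)

theorem find_first (q : Int → Bool) :
    ∀ (k : Nat) (a b j : Int), (b - a).toNat = k → a ≤ j → j < b → q j = true →
      ∃ j0, (PySem.List.pyRange a b 1).find? q = some j0 ∧ a ≤ j0 ∧ j0 ≤ j ∧ q j0 = true := by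
  intro k
  induction k with
  | zero => intro a b j hk h1 h2 _; omega
  | succ k ih =>
      intro a b j hk h1 h2 hq
      rw [PySem.List.pyRange_one_cons (by omega), List.find?_cons]
      cases hqa : q a with
      | true => exact ⟨a, by simp [List.find?_cons, hqa], le_refl a, h1, hqa⟩
      | false =>
          have hja : j ≠ a := fun h => by rw [h, hqa] at hq; exact Bool.false_ne_true hq
          simp only [hqa]
          obtain ⟨j0, hf, hj1, hj2, hj3⟩ := ih (a+1) b j (by omega) (by omega) h2 hq
          exact ⟨j0, hf, by omega, hj2, hj3⟩

theorem foldW_le_cand (s : List Char) (bnd : Int) :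
    ∀ (l : List Int) (m i j : Int), i ∈ l → i ≤ j → j < bnd →
      distC (PySem.List.slice s (some i) (some (j+1))) = distC s →
      l.foldl (stepW s bnd) m ≤ j + 1 - i := by
  intro l
  induction l with
  | nil => intro m i j hmem _ _ _; exact absurd hmem (List.not_mem_nil)
  | cons x tl ih =>
      intro m i j hmem hij hjb hcov
      rw [List.foldl_cons]
      rcases List.mem_cons.mp hmem with hx | hx
      · subst hx
        obtain ⟨j0, hf, hij0, hj0j, hq0⟩ := find_first
            (fun j => decide (distC (PySem.List.slice s (some i) (some (j+1))) = distC s))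
            (bnd - i).toNat i bnd j rfl hij hjb (decide_eq_true hcov)
        have hstep : stepW s bnd m i ≤ j + 1 - i := by
          unfold stepW
          rw [hf]
          simp only []
          split_ifs <;> omega
        exact le_trans (foldW_le_init s bnd tl _) hstep
      · exact ih _ i j hx hij hjb hcov

theorem foldW_cases (s : List Char) (bnd : Int) :
    ∀ (l : List Int) (m : Int),
      l.foldl (stepW s bnd) m = m ∨
        ∃ i, i ∈ l ∧ ∃ j0, i ≤ j0 ∧ j0 < bnd ∧
          distC (PySem.List.slice s (some i) (some (j0+1))) = distC s ∧
          l.foldl (stepW s bnd) m = j0 + 1 - i := by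
  intro l
  induction l with
  | nil => intro m; left; rfl
  | cons x tl ih =>
      intro m
      rw [List.foldl_cons]
      cases hf : (PySem.List.pyRange x bnd 1).find?
          (fun j => decide (distC (PySem.List.slice s (some x) (some (j+1))) = distC s)) with
      | none =>
          have hx : stepW s bnd m x = m := by unfold stepW; rw [hf]
          rw [hx]
          rcases ih m with h | ⟨i, hi, j0, h1, h2, h3, h4⟩
          · left; exact h
          · right; exact ⟨i, List.mem_cons_of_mem x hi, j0, h1, h2, h3, h4⟩
      | some j0 =>
          have hmem := PySem.List.mem_pyRange_one.mp (List.mem_of_find?_eq_some hf)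
          have htrue0 := List.find?_some hf
          have htrue : distC (PySem.List.slice s (some x) (some (j0+1))) = distC s :=
            of_decide_eq_true htrue0
          have hx : stepW s bnd m x = if j0 + 1 - x < m then j0 + 1 - x else m := by
            unfold stepW; rw [hf]
          rw [hx]
          rcases ih (if j0 + 1 - x < m then j0 + 1 - x else m) with h | ⟨i, hi, j1, h1, h2, h3, h4⟩
          · by_cases hlt : j0 + 1 - x < m
            · right
              exact ⟨x, List.mem_cons_self, j0, hmem.1, hmem.2, htrue, by rw [h, if_pos hlt]⟩
            · left; rw [h, if_neg hlt]
          · right; exact ⟨i, List.mem_cons_of_mem x hi, j1, h1, h2, h3, h4⟩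

-- bridge: the Bool window test of the ports vs the Nat-level covWin of D_
theorem covB_iff_covWin (s : List Char) (i j : Int) (h0 : 0 ≤ i) (hij : i ≤ j)
    (hj : j < (s.length : Int)) :
    distC (PySem.List.slice s (some i) (some (j+1))) = distC s
      ↔ covWin s i.toNat (j + 1 - i).toNat := by
  rw [PySem.List.slice_toNat _ h0 (by omega)]
  have h1 : (j+1).toNat - i.toNat = (j + 1 - i).toNat := by omega
  rw [h1]
  unfold covWin
  constructor
  · intro h; exact ⟨by omega, h⟩
  · intro h; exact h.2

theorem covWin_covB (s : List Char) (i l : Nat) (hl : 1 ≤ l) (hw : covWin s i l) :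
    distC (PySem.List.slice s (some (i:Int)) (some ((i:Int) + l))) = distC s := by
  rw [PySem.List.slice_toNat _ (by omega) (by omega)]
  have h1 : ((i:Int) + l).toNat - (i:Int).toNat = l := by omega
  rw [h1]
  exact hw.2

-- A's port as a fold of stepW with window ends < n-1
theorem A_red (str : String) (hl : ∀ c ∈ str.toList, c.toNat < 256) :
    smallSubDistinct str
      = (PySem.List.pyRange 0 (str.toList.length : Int) 1).foldl
          (stepW str.toList ((str.toList.length : Int) - 1)) (str.toList.length : Int) := by
  unfold smallSubDistinct
  simp only []
  rw [maxDistChar_eq str.toList hl]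
  apply PySem.List.foldl_congr_mem
  intro acc i hi
  have hi' := PySem.List.mem_pyRange_one.mp hi
  have hne : str.toList ≠ [] := by
    have : 0 < str.toList.length := by exact_mod_cast lt_of_le_of_lt hi'.1 hi'.2
    exact List.length_pos_iff.mp this
  have hinner := PySem.List.foldl_congr_mem
    (l := PySem.List.pyRange 0 ((str.toList.length : Int)) 1) (init := acc)
    (f := fun minl j =>
      if ((PySem.List.slice str.toList (some i) (some j)).length : Int) < minl ∧
          (distC str.toList : Int)
            = maxDistChar (PySem.List.slice str.toList (some i) (some j))
                ((PySem.List.slice str.toList (some i) (some j)).length : Int)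
      then ((PySem.List.slice str.toList (some i) (some j)).length : Int) else minl)
    (g := fun minl j =>
      if ((PySem.List.slice str.toList (some i) (some j)).length : Int) < minl ∧
          (distC str.toList : Int)
            = (distC (PySem.List.slice str.toList (some i) (some j)) : Int)
      then ((PySem.List.slice str.toList (some i) (some j)).length : Int) else minl)
    (fun acc2 j hj => by
      simp only []
      rw [maxDistChar_eq (PySem.List.slice str.toList (some i) (some j))
        (fun c hc => hl c (PySem.List.mem_of_mem_slice str.toList (some i) (some j) hc))])
  rw [hinner]
  rw [AinnerStd_eq str.toList hne i hi'.1 hi'.2 acc]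
  rfl

-- B's port as a fold of stepW with window ends < n
theorem B_red (str : String) :
    smallSubDistinct_alt str
      = (PySem.List.pyRange 0 (str.toList.length : Int) 1).foldl
          (stepW str.toList ((str.toList.length : Int))) (str.toList.length : Int) := by
  unfold smallSubDistinct_alt
  simp only []
  rw [setLen_ofList]
  apply PySem.List.foldl_congr_mem
  intro acc i hi
  have hi' := PySem.List.mem_pyRange_one.mp hi
  have hempty : (PySem.Set.empty : PySem.Set Char)
      = PySem.Set.ofList (PySem.List.slice str.toList (some i) (some i)) := by
    rw [slice_nil_of_le str.toList i i hi'.1 hi'.1 le_rfl]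
    rfl
  rw [hempty]
  rw [sdInner_eq str.toList i hi'.1 (str.toList.length : Int) le_rfl
      ((str.toList.length : Int) - i).toNat i acc rfl le_rfl]
  rfl

-- facts about suffStart
theorem suffStart_le (s : List Char) : suffStart s ≤ s.length := by
  unfold suffStart
  exact Nat.findGreatest_le s.length

theorem suffStart_spec (s : List Char) : (s.drop (suffStart s)).toFinset = s.toFinset := by
  unfold suffStart
  exact Nat.findGreatest_spec (P := fun i => (s.drop i).toFinset = s.toFinset)
    (Nat.zero_le s.length) rfl

theorem le_suffStart (s : List Char) (k : Nat) (hk : k ≤ s.length)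
    (h : (s.drop k).toFinset = s.toFinset) : k ≤ suffStart s := by
  unfold suffStart
  exact Nat.le_findGreatest hk h

theorem suffStart_lt (s : List Char) (hne : s ≠ []) : suffStart s < s.length := by
  rcases Nat.lt_or_ge (suffStart s) s.length with h | h
  · exact h
  · exfalso
    have hle := suffStart_le s
    have heq : suffStart s = s.length := by omega
    have hspec := suffStart_spec s
    rw [heq, List.drop_length] at hspec
    have hpos := distC_pos s hne
    have h0 : distC ([] : List Char) = distC s := by unfold distC; rw [hspec]
    have h00 : distC ([] : List Char) = 0 := by simp [distC]
    omega

theorem slice_full (s : List Char) (i : Int) (h0 : 0 ≤ i) :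
    PySem.List.slice s (some i) (some (s.length : Int)) = s.drop i.toNat := by
  rw [PySem.List.slice_toNat _ h0 (by omega)]
  have h1 : ((s.length : Int)).toNat = s.length := by omega
  rw [h1]
  apply List.take_of_length_le
  rw [List.length_drop]

-- enlarging a covering window (within the list) keeps it covering
theorem covWin_mono (s : List Char) (i l' i2 l : Nat) (h : covWin s i l') (h2 : i2 ≤ i)
    (h3 : i + l' ≤ i2 + l) (h4 : i2 + l ≤ s.length) : covWin s i2 l := by
  refine ⟨h4, le_antisymm ?_ ?_⟩
  · exact distC_le_of_subset (fun x hx => List.drop_subset _ _ (List.take_subset _ _ hx))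
  · rw [← h.2]
    apply distC_le_of_subset
    intro x hx
    have heq : (((s.drop i2).take l).drop (i - i2)).take l' = (s.drop i).take l' := by
      rw [List.drop_take, List.drop_drop]
      have hi : i2 + (i - i2) = i := by omega
      rw [hi, List.take_take]
      congr 1
      omega
    rw [← heq] at hx
    exact List.drop_subset _ _ (List.take_subset _ _ hx)

-- outside D_ the two folds coincide
theorem folds_eq_of_notD (s : List Char)
    (hnD : ¬ (1 ≤ suffStart s ∧
        ∀ i < suffStart s,
          ((s.drop i).take (s.length - suffStart s)).toFinset ≠ s.toFinset)) :
    (PySem.List.pyRange 0 (s.length : Int) 1).foldl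
        (stepW s ((s.length : Int) - 1)) (s.length : Int)
      = (PySem.List.pyRange 0 (s.length : Int) 1).foldl
          (stepW s ((s.length : Int))) (s.length : Int) := by
  set nI : Int := (s.length : Int) with hn
  apply le_antisymm
  -- A ≤ B
  · rcases foldW_cases s nI (PySem.List.pyRange 0 nI 1) nI with hB | ⟨i, hi, j0, h1, h2, h3, hBv⟩
    · rw [hB]; exact foldW_le_init s (nI - 1) _ _
    · have hi' := PySem.List.mem_pyRange_one.mp hi
      by_cases hj : j0 < nI - 1
      · rw [hBv]
        exact foldW_le_cand s (nI - 1) _ nI i j0 hi h1 hj h3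
      · -- j0 = nI - 1 : B's candidate window ends at the last character
        have hj0 : j0 = nI - 1 := by omega
        by_cases hi0 : i = 0
        · rw [hBv, hj0, hi0]
          have := foldW_le_init s (nI - 1) (PySem.List.pyRange 0 nI 1) nI
          omega
        · -- the window [i, n) covers, so i ≤ suffStart s
          have hdrop : distC (s.drop i.toNat) = distC s := by
            have h3' := h3
            rw [hj0, show nI - 1 + 1 = nI from by ring, hn, slice_full s i hi'.1] at h3'
            exact h3'
          have hible : i.toNat ≤ suffStart s :=
            le_suffStart s i.toNat (by omega)
              ((window_eq_iff s (s.drop i.toNat) (List.drop_subset _ _)).mpr hdrop)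
          have hb1 : 1 ≤ suffStart s := by omega
          push_neg at hnD
          obtain ⟨i', hi'b, hw'⟩ := hnD hb1
          have hne : s ≠ [] := List.length_pos_iff.mp (by omega)
          have hbn : suffStart s < s.length := suffStart_lt s hne
          have hl1 : 1 ≤ s.length - suffStart s := by omega
          have hw : covWin s i' (s.length - suffStart s) :=
            ⟨by omega, (window_eq_iff s _
              (fun x hx => List.drop_subset _ _ (List.take_subset _ _ hx))).mp hw'⟩
          have hcov' := covWin_covB s i' (s.length - suffStart s) hl1 hw
          have hA := foldW_le_cand s (nI - 1) (PySem.List.pyRange 0 nI 1) nI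
            (i' : Int) ((i' : Int) + ((s.length - suffStart s : Nat) : Int) - 1)
            (PySem.List.mem_pyRange_one.mpr (by constructor <;> omega))
            (by omega) (by omega)
            (by rw [show (i' : Int) + ((s.length - suffStart s : Nat) : Int) - 1 + 1
                      = (i' : Int) + ((s.length - suffStart s : Nat) : Int) from by ring]
                exact hcov')
          rw [hBv, hj0]
          omega
  -- B ≤ A
  · rcases foldW_cases s (nI - 1) (PySem.List.pyRange 0 nI 1) nI with hA | ⟨i, hi, j0, h1, h2, h3, hAv⟩
    · rw [hA]; exact foldW_le_init s nI _ _
    · rw [hAv]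
      exact foldW_le_cand s nI _ nI i j0 hi h1 (by omega) h3

-- inside D_: B's fold is strictly smaller than A's
theorem folds_lt_of_D (s : List Char)
    (hD : 1 ≤ suffStart s ∧
        ∀ i < suffStart s,
          ((s.drop i).take (s.length - suffStart s)).toFinset ≠ s.toFinset) :
    (PySem.List.pyRange 0 (s.length : Int) 1).foldl
        (stepW s ((s.length : Int))) (s.length : Int)
      < (PySem.List.pyRange 0 (s.length : Int) 1).foldl
          (stepW s ((s.length : Int) - 1)) (s.length : Int) := by
  obtain ⟨hb1, hno⟩ := hD
  have hble := suffStart_le s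
  have hne : s ≠ [] := List.length_pos_iff.mp (by omega)
  have hbn : suffStart s < s.length := suffStart_lt s hne
  set nI : Int := (s.length : Int) with hn
  have hcovb : distC (s.drop (suffStart s)) = distC s :=
    (window_eq_iff s _ (List.drop_subset _ _)).mp (suffStart_spec s)
  have hslice : distC (PySem.List.slice s (some ((suffStart s : Int))) (some nI)) = distC s := by
    rw [hn, slice_full s ((suffStart s : Int)) (by omega)]
    have ht : ((suffStart s : Int)).toNat = suffStart s := by omega
    rw [ht]
    exact hcovb
  -- B ≤ n - b
  have hB : (PySem.List.pyRange 0 nI 1).foldl (stepW s nI) nI ≤ nI - suffStart s := by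
    have := foldW_le_cand s nI (PySem.List.pyRange 0 nI 1) nI
      ((suffStart s : Int)) (nI - 1)
      (PySem.List.mem_pyRange_one.mpr (by constructor <;> omega))
      (by omega) (by omega)
      (by rw [show nI - 1 + 1 = nI from by ring]; exact hslice)
    omega
  -- n - b < A
  have hA : nI - suffStart s < (PySem.List.pyRange 0 nI 1).foldl (stepW s (nI - 1)) nI := by
    rcases foldW_cases s (nI - 1) (PySem.List.pyRange 0 nI 1) nI with hAv | ⟨i, hi, j0, h1, h2, h3, hAv⟩
    · rw [hAv]; omega
    · have hi' := PySem.List.mem_pyRange_one.mp hi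
      have hwin : covWin s i.toNat (j0 + 1 - i).toNat :=
        (covB_iff_covWin s i j0 hi'.1 h1 (by omega)).mp h3
      rw [hAv]
      by_contra hcon
      push_neg at hcon
      -- the A-window lies in the prefix and is no longer than n - b: slide it under b
      by_cases hcase : i.toNat ≤ suffStart s - 1
      · exact hno i.toNat (by omega)
          ((window_eq_iff s _
              (fun x hx => List.drop_subset _ _ (List.take_subset _ _ hx))).mpr
            (covWin_mono s i.toNat (j0 + 1 - i).toNat i.toNat (s.length - suffStart s)
              hwin le_rfl (by omega) (by omega)).2)
      · exact hno (suffStart s - 1) (by omega)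
          ((window_eq_iff s _
              (fun x hx => List.drop_subset _ _ (List.take_subset _ _ hx))).mpr
            (covWin_mono s i.toNat (j0 + 1 - i).toNat (suffStart s - 1) (s.length - suffStart s)
              hwin (by omega) (by omega) (by omega)).2)
  omega

-- ===== VERDICT (by name: the statements are the Claim_ definitions above) =====
theorem smallSubDistinct_spec : Claim_unchanged_smallSubDistinct := by
  intro str hdom
  unfold Spec_smallSubDistinct
  intro hnD
  have hl : ∀ c ∈ str.toList, c.toNat < 256 := by
    intro c hc
    have h := List.all_eq_true.mp hdom c hc
    simp only [pvDomChar, Bool.or_eq_true, Bool.and_eq_true, decide_eq_true_eq, beq_iff_eq] at h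
    omega
  rw [A_red str hl, B_red str]
  unfold D_smallSubDistinct at hnD
  exact folds_eq_of_notD str.toList hnD

theorem smallSubDistinct_changed : Claim_changed_smallSubDistinct := by
  unfold Claim_changed_smallSubDistinct
  refine ⟨by decide, by decide, ?_, ?_, by decide⟩
  · show smallSubDistinct "aab" = 3
    rw [A_red "aab" (by intro c hc; fin_cases hc <;> decide)]
    decide
  · show smallSubDistinct_alt "aab" = 2
    rw [B_red "aab"]
    decide

theorem smallSubDistinct_tight : Claim_exact_smallSubDistinct := by
  intro str hdom hD
  have hl : ∀ c ∈ str.toList, c.toNat < 256 := by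
    intro c hc
    have h := List.all_eq_true.mp hdom c hc
    simp only [pvDomChar, Bool.or_eq_true, Bool.and_eq_true, decide_eq_true_eq, beq_iff_eq] at h
    omega
  rw [A_red str hl, B_red str]
  unfold D_smallSubDistinct at hD
  exact (ne_of_lt (folds_lt_of_D str.toList hD)).symm
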